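-- pv_equiv track=rewrite | github.com/jahaselden/CS_320_algos_course_work | Lab5/main.py | create_empty_space_lists
-- ===== SOURCE A (Python) =====
-- def create_empty_space_lists(field):
--     green_empty = []
--     gold_empty = []
--     L = len(field)
--     for i in range(0, L):
--         for j in range(0, L):
--             if field[i][j] is True:
--                 if j < L // 2:
--                     green_empty.append((i, j))
--                 else:
--                     gold_empty.append((i, j))
--     return green_empty, gold_empty
-- ===== SOURCE B (Python) =====
-- def create_empty_space_lists(field):
--     L = len(field)
--     # Phase 1: one flat pass over cell indices 0..L*L-1, recovering (row, col)
--     # by index arithmetic; collect every empty cell in row-major order.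
--     empties = []
--     for k in range(L * L):
--         i, j = divmod(k, L)
--         if field[i][j] is True:
--             empties.append((i, j))
--     # Phase 2: stable partition of the collected cells at the middle column.
--     half = L // 2
--     green_empty = [c for c in empties if c[1] < half]
--     gold_empty = [c for c in empties if c[1] >= half]
--     return green_empty, gold_empty
-- ===== Notes on version B (the rewrite author's own statement) =====
-- stated objective: alternative
-- what changed: Replaces A's nested row/column loops with a branchy append by a single flat loop over cell index k (divmod recovers the coordinates) that collects all empty cells into one intermediate list, followed by a stable partition of that list at column L//2.
import Mathlib
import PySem

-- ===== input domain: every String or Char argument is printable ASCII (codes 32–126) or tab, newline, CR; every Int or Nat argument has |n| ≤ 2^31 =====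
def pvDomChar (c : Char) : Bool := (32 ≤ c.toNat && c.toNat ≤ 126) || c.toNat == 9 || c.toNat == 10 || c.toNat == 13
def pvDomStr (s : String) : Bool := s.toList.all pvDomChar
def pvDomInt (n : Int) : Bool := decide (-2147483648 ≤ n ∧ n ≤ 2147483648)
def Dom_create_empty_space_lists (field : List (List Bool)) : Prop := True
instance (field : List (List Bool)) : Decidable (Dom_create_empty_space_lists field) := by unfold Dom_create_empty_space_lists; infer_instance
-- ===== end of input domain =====

-- B replaces A's nested row/column loops (inner branch appending to one of two lists)
-- by one flat pass over cell index k with divmod coordinate recovery collecting all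
-- empty cells, then a stable partition at column L//2 (objective: alternative, same cost).

-- ===== PORT A =====
def create_empty_space_lists (field : List (List Bool)) : (List (Int × Int)) × (List (Int × Int)) :=
  let L : Int := field.length
  (PySem.List.pyRange 0 L 1).foldl (fun acc i =>
    (PySem.List.pyRange 0 L 1).foldl (fun acc j =>
      if PySem.List.pyGetD (PySem.List.pyGetD field i []) j false = true then
        if j < PySem.Int.floordiv L 2 then (acc.1 ++ [(i, j)], acc.2)
        else (acc.1, acc.2 ++ [(i, j)])
      else acc) acc) (([], []) : List (Int × Int) × List (Int × Int))

-- ===== PORT B =====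
-- divmod(k, L) is only evaluated with L > 0 (the loop is empty when L = 0), so the
-- total floordiv/mod pair is exact for it here.
def create_empty_space_lists_alt (field : List (List Bool)) : (List (Int × Int)) × (List (Int × Int)) :=
  let L : Int := field.length
  let empties : List (Int × Int) :=
    (PySem.List.pyRange 0 (L * L) 1).foldl (fun acc k =>
      let i := PySem.Int.floordiv k L
      let j := PySem.Int.mod k L
      if PySem.List.pyGetD (PySem.List.pyGetD field i []) j false = true then acc ++ [(i, j)]
      else acc) []
  let half : Int := PySem.Int.floordiv L 2
  (empties.filter (fun c => decide (c.2 < half)),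
   empties.filter (fun c => decide (half ≤ c.2)))

-- ===== PRECONDITION & SPEC =====
-- A indexes field[i][j] for every j < len(field); it raises IndexError whenever some
-- row is shorter than the field itself, so exactly those inputs are excluded.
def Pre_create_empty_space_lists (field : List (List Bool)) : Prop :=
  ∀ row ∈ field, field.length ≤ row.length
instance (field : List (List Bool)) : Decidable (Pre_create_empty_space_lists field) := by unfold Pre_create_empty_space_lists; infer_instance

def pvWitness_create_empty_space_lists : List (List Bool) :=
  [[true, false], [false, true]]

def Spec_create_empty_space_lists (field : List (List Bool)) (out : (List (Int × Int)) × (List (Int × Int))) : Prop := out = create_empty_space_lists_alt field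
instance (field : List (List Bool)) (out : (List (Int × Int)) × (List (Int × Int))) : Decidable (Spec_create_empty_space_lists field out) := by unfold Spec_create_empty_space_lists; infer_instance

-- ===== CLAIM (what is proved, stated in full; the proofs are below) =====
def Claim_equal_create_empty_space_lists : Prop := ∀ (field : List (List Bool)), Dom_create_empty_space_lists field → Pre_create_empty_space_lists field → Spec_create_empty_space_lists field (create_empty_space_lists field)

-- ===== LEMMAS AND PROOFS =====

-- the cell getter both ports read through
def cespG (field : List (List Bool)) (i j : Int) : Bool :=
  PySem.List.pyGetD (PySem.List.pyGetD field i []) j false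

-- shared normal form: row-major list of (i, j) with q i j, over Nat ranges
def cespNF (len : Nat) (q : Int → Int → Bool) : List (Int × Int) :=
  (List.range len).flatMap (fun i =>
    ((List.range len).filter (fun j => q (Int.ofNat i) (Int.ofNat j))).map
      (fun j => (Int.ofNat i, Int.ofNat j)))

-- A's inner loop over one row, split into its two independent accumulators.
lemma cesl_inner_eq (row : List Bool) (i half L : Int) (acc : List (Int×Int) × List (Int×Int)) :
  (PySem.List.pyRange 0 L 1).foldl (fun acc j =>
      if PySem.List.pyGetD row j false = true then
        if j < half then (acc.1 ++ [(i, j)], acc.2)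
        else (acc.1, acc.2 ++ [(i, j)])
      else acc) acc
  = (acc.1 ++ ((PySem.List.pyRange 0 L 1).filter (fun j => PySem.List.pyGetD row j false && decide (j < half))).map (fun j => (i, j)),
     acc.2 ++ ((PySem.List.pyRange 0 L 1).filter (fun j => PySem.List.pyGetD row j false && !decide (j < half))).map (fun j => (i, j))) := by
  obtain ⟨a, b⟩ := acc
  rw [PySem.List.foldl_congr_mem (g := fun (acc : List (Int×Int) × List (Int×Int)) j =>
      ((fun a j => if PySem.List.pyGetD row j false && decide (j < half) then a ++ [(i,j)] else a) acc.1 j,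
       (fun b j => if PySem.List.pyGetD row j false && !decide (j < half) then b ++ [(i,j)] else b) acc.2 j))]
  · rw [PySem.List.foldl_prod_mk
        (f := fun a j => if PySem.List.pyGetD row j false && decide (j < half) then a ++ [(i,j)] else a)
        (g := fun b j => if PySem.List.pyGetD row j false && !decide (j < half) then b ++ [(i,j)] else b)]
    rw [PySem.List.foldl_append_if, PySem.List.foldl_append_if]
  · intro acc j _
    by_cases h1 : PySem.List.pyGetD row j false = true <;> by_cases h2 : j < half <;>
      simp [h1, h2]

-- A's outer loop with two independent appending accumulators is a pair of flatMaps.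
lemma cesl_outer_eq (L : Int) (G H : Int → List (Int × Int)) :
  (PySem.List.pyRange 0 L 1).foldl (fun (acc : List (Int×Int) × List (Int×Int)) i => (acc.1 ++ G i, acc.2 ++ H i)) ([], [])
  = ((PySem.List.pyRange 0 L 1).flatMap G, (PySem.List.pyRange 0 L 1).flatMap H) := by
  rw [PySem.List.foldl_prod_mk (f := fun a i => a ++ G i) (g := fun b i => b ++ H i)]
  rw [PySem.List.foldl_append_eq_flatMap, PySem.List.foldl_append_eq_flatMap]
  simp

-- flattening of a rectangular index space
lemma cesl_range_mul (a b : Nat) :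
    List.range (a * b) = (List.range a).flatMap (fun i => (List.range b).map (fun j => b * i + j)) := by
  induction a with
  | zero => simp
  | succ a ih =>
    rw [Nat.succ_mul, List.range_add, List.range_succ, List.flatMap_append, ih]
    simp [Nat.mul_comm]

lemma cesl_floordiv (i j L : Nat) (hj : j < L) :
    PySem.Int.floordiv ((L * i + j : Nat) : Int) (L : Int) = Int.ofNat i := by
  rw [PySem.Int.floordiv_natCast]
  rw [Nat.mul_add_div (by omega : 0 < L), Nat.div_eq_of_lt hj]
  simp [Int.ofNat_eq_natCast]

lemma cesl_mod (i j L : Nat) (hj : j < L) :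
    PySem.Int.mod ((L * i + j : Nat) : Int) (L : Int) = Int.ofNat j := by
  rw [PySem.Int.mod_natCast]
  rw [Nat.mul_add_mod, Nat.mod_eq_of_lt hj]
  simp [Int.ofNat_eq_natCast]

-- A's per-row Int-range scans reduce to the shared normal form.
lemma cesl_NF (len : Nat) (q : Int → Int → Bool) :
    (PySem.List.pyRange 0 (len : Int) 1).flatMap (fun i =>
        ((PySem.List.pyRange 0 (len : Int) 1).filter (fun j => q i j)).map (fun j => (i, j)))
    = cespNF len q := by
  unfold cespNF
  rw [PySem.List.pyRange_zero_natCast, List.flatMap_map]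
  refine List.flatMap_congr ?_
  intro i _
  rw [List.filter_map, List.map_map]
  rfl

-- B's collected list of empty cells is the shared normal form of the bare getter.
lemma cesl_empties_eq (field : List (List Bool)) :
    (PySem.List.pyRange 0 ((field.length : Int) * (field.length : Int)) 1).foldl (fun acc k =>
      if PySem.List.pyGetD (PySem.List.pyGetD field (PySem.Int.floordiv k (field.length : Int)) []) (PySem.Int.mod k (field.length : Int)) false = true
      then acc ++ [(PySem.Int.floordiv k (field.length : Int), PySem.Int.mod k (field.length : Int))]
      else acc) []
    = cespNF field.length (cespG field) := by
  rw [PySem.List.foldl_append_if, List.nil_append]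
  rw [show ((field.length : Int) * (field.length : Int)) = ((field.length * field.length : Nat) : Int) by push_cast; ring]
  rw [PySem.List.pyRange_zero_natCast, List.filter_map, List.map_map,
      cesl_range_mul, List.filter_flatMap, List.map_flatMap]
  unfold cespNF
  refine List.flatMap_congr ?_
  intro i _
  rw [List.filter_map, List.map_map]
  rw [List.filter_congr (q := fun j => cespG field (Int.ofNat i) (Int.ofNat j))]
  · refine List.map_congr_left ?_
    intro j hj
    have hjl : j < field.length := List.mem_range.mp (List.mem_filter.mp hj).1
    simp only [Function.comp_apply]
    rw [cesl_floordiv i j field.length hjl, cesl_mod i j field.length hjl]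
  · intro j hj
    have hjl : j < field.length := List.mem_range.mp hj
    simp only [Function.comp_apply, cespG]
    rw [cesl_floordiv i j field.length hjl, cesl_mod i j field.length hjl]

-- filtering the collected list by a column predicate pushes into the per-row scans
lemma cesl_filter_NF (len : Nat) (g : Int → Int → Bool) (p : Int → Bool) :
    (cespNF len g).filter (fun c => p c.2)
    = cespNF len (fun i j => g i j && p j) := by
  unfold cespNF
  rw [List.filter_flatMap]
  refine List.flatMap_congr ?_
  intro i _
  rw [List.filter_map, List.filter_filter]
  congr 1
  refine List.filter_congr ?_
  intro j _
  simp [Bool.and_comm]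

lemma cesl_main (field : List (List Bool)) :
    create_empty_space_lists field = create_empty_space_lists_alt field := by
  unfold create_empty_space_lists create_empty_space_lists_alt
  simp only []
  rw [PySem.List.foldl_congr_mem (g := fun (acc : List (Int×Int) × List (Int×Int)) i =>
      (acc.1 ++ ((PySem.List.pyRange 0 (field.length : Int) 1).filter
          (fun j => PySem.List.pyGetD (PySem.List.pyGetD field i []) j false && decide (j < PySem.Int.floordiv (field.length : Int) 2))).map (fun j => (i, j)),
       acc.2 ++ ((PySem.List.pyRange 0 (field.length : Int) 1).filter
          (fun j => PySem.List.pyGetD (PySem.List.pyGetD field i []) j false && !decide (j < PySem.Int.floordiv (field.length : Int) 2))).map (fun j => (i, j))))]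
  · rw [cesl_outer_eq, cesl_empties_eq,
        cesl_filter_NF field.length (cespG field) (fun j => decide (j < PySem.Int.floordiv (field.length : Int) 2)),
        cesl_filter_NF field.length (cespG field) (fun j => decide (PySem.Int.floordiv (field.length : Int) 2 ≤ j))]
    simp only [cespG]
    rw [cesl_NF field.length (fun i j => PySem.List.pyGetD (PySem.List.pyGetD field i []) j false && decide (j < PySem.Int.floordiv (field.length : Int) 2)),
        cesl_NF field.length (fun i j => PySem.List.pyGetD (PySem.List.pyGetD field i []) j false && !decide (j < PySem.Int.floordiv (field.length : Int) 2))]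
    refine Prod.ext rfl ?_
    dsimp only
    congr 1
    funext i j
    congr 1
    rw [← decide_not]
    simp
  · intro acc i _
    exact cesl_inner_eq _ _ _ _ _

-- ===== VERDICT (by name: the statement is the Claim_ definition above) =====
theorem create_empty_space_lists_spec : Claim_equal_create_empty_space_lists := by
  intro field _ _
  unfold Spec_create_empty_space_lists
  exact cesl_main field
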